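-- pv_equiv track=rewrite | github.com/ZouWang-spider/Dual-GNN | DualHGNN/BaseModel/Struct_to_Hetero.py | extract_position_edges
-- ===== SOURCE A (Python) =====
-- def extract_position_edges(distance_features):
--     word_to_disfeature_edges = ([], [])
--     disfeature_to_word_edges = ([], [])
--     # 距离特征映射到整数索引
--     disfeature_map = {}
--     current_idx = 0
--     for i, row in enumerate(distance_features):
--         for j, distance in enumerate(row):
--             if i != j:  # 跳过自环（对角线上的0值）
--                 if distance not in disfeature_map:
--                     disfeature_map[distance] = current_idx
--                     current_idx += 1
--
--                 feature_idx = disfeature_map[distance]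
--
--                 # ('word', 'dis', 'dis_feature') -> word i to dis_feature (feature_idx)
--                 word_to_disfeature_edges[0].append(i)
--                 word_to_disfeature_edges[1].append(feature_idx)
--
--                 # ('dis_feature', 'dis', 'word') -> dis_feature (feature_idx) to word j
--                 disfeature_to_word_edges[0].append(feature_idx)
--                 disfeature_to_word_edges[1].append(j)
--     return word_to_disfeature_edges, disfeature_to_word_edges, disfeature_map
-- ===== SOURCE B (Python) =====
-- def extract_position_edges(distance_features):
--     # Materialize the off-diagonal cells once, in row-major order.
--     cells = [(i, j, d)
--              for i, row in enumerate(distance_features)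
--              for j, d in enumerate(row) if i != j]
--     # Distinct distances in first-encounter order, then index by position.
--     disfeature_map = {d: k
--                       for k, d in enumerate(dict.fromkeys(d for _, _, d in cells))}
--     word_to_disfeature_edges = ([i for i, _, _ in cells],
--                                 [disfeature_map[d] for _, _, d in cells])
--     disfeature_to_word_edges = ([disfeature_map[d] for _, _, d in cells],
--                                 [j for _, j, _ in cells])
--     return word_to_disfeature_edges, disfeature_to_word_edges, disfeature_map
-- ===== Notes on version B (the rewrite author's own statement) =====
-- stated objective: alternative
-- what changed: B materializes the off-diagonal cell list once, derives the distance-to-index table as an ordered dedup (dict.fromkeys) of the cells' distances indexed by enumerate, and builds each of the four edge lists as an independent comprehension by lookup, instead of A's single fused loop that grows a dict with a running counter and appends to four lists in lockstep.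
import Mathlib
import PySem

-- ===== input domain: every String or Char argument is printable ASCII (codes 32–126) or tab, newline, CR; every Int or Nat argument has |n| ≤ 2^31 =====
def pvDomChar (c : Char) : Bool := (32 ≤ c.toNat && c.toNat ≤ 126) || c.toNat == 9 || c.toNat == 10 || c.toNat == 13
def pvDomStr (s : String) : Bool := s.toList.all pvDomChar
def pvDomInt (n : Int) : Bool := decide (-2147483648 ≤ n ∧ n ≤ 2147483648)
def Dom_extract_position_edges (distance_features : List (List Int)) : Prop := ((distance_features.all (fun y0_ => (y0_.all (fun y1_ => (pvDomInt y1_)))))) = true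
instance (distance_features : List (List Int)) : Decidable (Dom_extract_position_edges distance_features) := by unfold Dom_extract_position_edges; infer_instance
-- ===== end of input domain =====

-- B materializes the off-diagonal cell list once, derives the distance→index table as an
-- ordered dedup of the cells' distances indexed by position, and builds each edge list as an
-- independent map by lookup — instead of A's fused loop growing a dict with a running counter.
-- Alternative decomposition, same asymptotic cost.

-- ===== PORT A =====
def extract_position_edges (distance_features : List (List Int)) :
    (List Int × List Int) × (List Int × List Int) × (List (Int × Int)) :=
  let st :=
    (PySem.List.enumerate distance_features).foldl (fun st irow =>
      (PySem.List.enumerate irow.2).foldl (fun st jd =>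
        if irow.1 ≠ jd.1 then
          -- `if distance not in disfeature_map: insert; current_idx += 1`
          let md :=
            if (st.2.2.1.contains jd.2) = false then
              (st.2.2.1.insert jd.2 st.2.2.2, st.2.2.2 + 1)
            else (st.2.2.1, st.2.2.2)
          let feature_idx := md.1.getD jd.2 0
          ((st.1.1 ++ [irow.1], st.1.2 ++ [feature_idx]),
           (st.2.1.1 ++ [feature_idx], st.2.1.2 ++ [jd.1]), md.1, md.2)
        else st) st)
      ((([], []), ([], []), (PySem.Dict.empty : PySem.Dict Int Int), (0 : Int)))
  (st.1, st.2.1, st.2.2.1.items)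

-- ===== PORT B =====
def extract_position_edges_alt (distance_features : List (List Int)) :
    (List Int × List Int) × (List Int × List Int) × (List (Int × Int)) :=
  -- cells = [(i, j, d) for i, row in enumerate(...) for j, d in enumerate(row) if i != j]
  let cells := (PySem.List.enumerate distance_features).flatMap (fun ir =>
    ((PySem.List.enumerate ir.2).filter (fun jd => ir.1 != jd.1)).map
      (fun jd => (ir.1, jd.1, jd.2)))
  -- {d: k for k, d in enumerate(dict.fromkeys(d for _, _, d in cells))}
  let disfeature_map :=
    (PySem.List.enumerate (PySem.List.dedup (cells.map (fun c => c.2.2)))).foldl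
      (fun m kd => m.insert kd.2 kd.1) (PySem.Dict.empty : PySem.Dict Int Int)
  ((cells.map (fun c => c.1), cells.map (fun c => disfeature_map.getD c.2.2 0)),
   (cells.map (fun c => disfeature_map.getD c.2.2 0), cells.map (fun c => c.2.1)),
   disfeature_map.items)

-- ===== PRECONDITION & SPEC =====
def Spec_extract_position_edges (distance_features : List (List Int)) (out : (List Int × List Int) × (List Int × List Int) × (List (Int × Int))) : Prop := out = extract_position_edges_alt distance_features
instance (distance_features : List (List Int)) (out : (List Int × List Int) × (List Int × List Int) × (List (Int × Int))) : Decidable (Spec_extract_position_edges distance_features out) := by unfold Spec_extract_position_edges; infer_instance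

-- ===== CLAIM (what is proved, stated in full; the proofs are below) =====
def Claim_equal_extract_position_edges : Prop := ∀ (distance_features : List (List Int)), Dom_extract_position_edges distance_features → Spec_extract_position_edges distance_features (extract_position_edges distance_features)

-- ===== LEMMAS AND PROOFS =====

-- All cells (i, j, distance) in the row-major scan order (diagonal included).
def pvCells (df : List (List Int)) : List (Int × Int × Int) :=
  (PySem.List.enumerate df).flatMap (fun ir =>
    (PySem.List.enumerate ir.2).map (fun jd => (ir.1, jd.1, jd.2)))

-- A's loop body, one cell at a time.
def pvStepA (st : (List Int × List Int) × (List Int × List Int) × PySem.Dict Int Int × Int)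
    (c : Int × Int × Int) :
    (List Int × List Int) × (List Int × List Int) × PySem.Dict Int Int × Int :=
  if c.1 ≠ c.2.1 then
    let md :=
      if (st.2.2.1.contains c.2.2) = false then
        (st.2.2.1.insert c.2.2 st.2.2.2, st.2.2.2 + 1)
      else (st.2.2.1, st.2.2.2)
    let f := md.1.getD c.2.2 0
    ((st.1.1 ++ [c.1], st.1.2 ++ [f]), (st.2.1.1 ++ [f], st.2.1.2 ++ [c.2.1]), md.1, md.2)
  else st

-- the map-building part of A's body, guarded by the diagonal test
def pvStepM (m : PySem.Dict Int Int) (c : Int × Int × Int) : PySem.Dict Int Int :=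
  if c.1 ≠ c.2.1 ∧ m.contains c.2.2 = false then m.insert c.2.2 (m.size : Int) else m

-- the edge-emitting part of A's body, with a fixed table mf
def pvStepE (mf : PySem.Dict Int Int)
    (e : (List Int × List Int) × (List Int × List Int)) (c : Int × Int × Int) :
    (List Int × List Int) × (List Int × List Int) :=
  if c.1 ≠ c.2.1 then
    let f := mf.getD c.2.2 0
    ((e.1.1 ++ [c.1], e.1.2 ++ [f]), (e.2.1 ++ [f], e.2.2 ++ [c.2.1]))
  else e

-- B's index table, as a function of the key list.
def pvMkIdx (ks : List Int) : PySem.Dict Int Int :=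
  (PySem.List.enumerate ks).foldl (fun m kd => m.insert kd.2 kd.1)
    (PySem.Dict.empty : PySem.Dict Int Int)

lemma pvA_cells (df : List (List Int)) :
    extract_position_edges df =
      (((pvCells df).foldl pvStepA ((([], []), ([], []), PySem.Dict.empty, (0 : Int)))).1,
       ((pvCells df).foldl pvStepA ((([], []), ([], []), PySem.Dict.empty, (0 : Int)))).2.1,
       ((pvCells df).foldl pvStepA ((([], []), ([], []), PySem.Dict.empty, (0 : Int)))).2.2.1.items) := by
  unfold extract_position_edges pvCells
  simp only [List.foldl_flatMap, List.foldl_map]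
  rfl

-- the map stage never touches a key already present: lookups of present keys are stable
lemma pvM_mono (L : List (Int × Int × Int)) (m : PySem.Dict Int Int) (k : Int)
    (hk : m.contains k = true) : (L.foldl pvStepM m).get? k = m.get? k := by
  induction L generalizing m with
  | nil => rfl
  | cons c L ih =>
    simp only [List.foldl_cons]
    by_cases h : c.1 ≠ c.2.1 ∧ m.contains c.2.2 = false
    · have hne : k ≠ c.2.2 := by
        intro he; rw [he] at hk; exact absurd hk (by simp [h.2])
      have hstep : pvStepM m c = m.insert c.2.2 (m.size : Int) := by
        unfold pvStepM; rw [if_pos h]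
      rw [hstep, ih _ (by rw [PySem.Dict.contains_insert]; simp [hk]),
        PySem.Dict.get?_insert_of_ne _ _ hne]
    · have hstep : pvStepM m c = m := by unfold pvStepM; rw [if_neg h]
      rw [hstep]; exact ih _ hk

-- Main invariant: A's fused fold equals (edge fold with the finished table, finished table,
-- its size), provided A's running counter equals the current table size.
lemma pvMain (L : List (Int × Int × Int))
    (e1 e2 : List Int × List Int) (m : PySem.Dict Int Int) :
    L.foldl pvStepA ((e1, e2, m, (m.size : Int))) =
      ((L.foldl (pvStepE (L.foldl pvStepM m)) ((e1, e2))).1,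
       (L.foldl (pvStepE (L.foldl pvStepM m)) ((e1, e2))).2,
       L.foldl pvStepM m, ((L.foldl pvStepM m).size : Int)) := by
  induction L generalizing e1 e2 m with
  | nil => rfl
  | cons c L ih =>
    simp only [List.foldl_cons]
    by_cases hij : c.1 = c.2.1
    · have hA : pvStepA (e1, e2, m, (m.size : Int)) c = (e1, e2, m, (m.size : Int)) := by
        unfold pvStepA; simp [hij]
      have hM : pvStepM m c = m := by unfold pvStepM; simp [hij]
      have hE : pvStepE (L.foldl pvStepM m) (e1, e2) c = (e1, e2) := by
        unfold pvStepE; simp [hij]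
      rw [hA, hM, hE, ih]
    · by_cases hc : m.contains c.2.2 = true
      · -- distance already in the table
        have hM : pvStepM m c = m := by unfold pvStepM; simp [hc]
        have hget : (L.foldl pvStepM m).getD c.2.2 0 = m.getD c.2.2 0 := by
          rw [PySem.Dict.getD_eq_get?_getD, PySem.Dict.getD_eq_get?_getD, pvM_mono L m _ hc]
        have hA : pvStepA (e1, e2, m, (m.size : Int)) c =
            ((e1.1 ++ [c.1], e1.2 ++ [m.getD c.2.2 0]),
             (e2.1 ++ [m.getD c.2.2 0], e2.2 ++ [c.2.1]), m, (m.size : Int)) := by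
          unfold pvStepA; simp [hij, hc]
        have hE : pvStepE (L.foldl pvStepM m) (e1, e2) c =
            ((e1.1 ++ [c.1], e1.2 ++ [m.getD c.2.2 0]),
             (e2.1 ++ [m.getD c.2.2 0], e2.2 ++ [c.2.1])) := by
          unfold pvStepE; simp [hij, hget]
        rw [hA, hM, hE,
          ih (e1.1 ++ [c.1], e1.2 ++ [m.getD c.2.2 0])
             (e2.1 ++ [m.getD c.2.2 0], e2.2 ++ [c.2.1]) m]
      · -- new distance: both insert it at index m.size
        have hc' : m.contains c.2.2 = false := by simpa using hc
        have hM : pvStepM m c = m.insert c.2.2 (m.size : Int) := by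
          unfold pvStepM; simp [hij, hc']
        have hsz : ((m.insert c.2.2 (m.size : Int)).size : Int) = (m.size : Int) + 1 := by
          rw [PySem.Dict.size_insert]; simp [hc']
        have hA : pvStepA (e1, e2, m, (m.size : Int)) c =
            ((e1.1 ++ [c.1], e1.2 ++ [(m.size : Int)]),
             (e2.1 ++ [(m.size : Int)], e2.2 ++ [c.2.1]),
             m.insert c.2.2 (m.size : Int), (m.size : Int) + 1) := by
          unfold pvStepA
          simp [hij, hc', PySem.Dict.getD_insert_self]
        have hget : (L.foldl pvStepM (m.insert c.2.2 (m.size : Int))).getD c.2.2 0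
            = (m.size : Int) := by
          rw [PySem.Dict.getD_eq_get?_getD,
            pvM_mono L _ _ (PySem.Dict.contains_insert_self _ _ _),
            PySem.Dict.get?_insert_self]
          rfl
        have hE : pvStepE (L.foldl pvStepM (m.insert c.2.2 (m.size : Int))) (e1, e2) c =
            ((e1.1 ++ [c.1], e1.2 ++ [(m.size : Int)]),
             (e2.1 ++ [(m.size : Int)], e2.2 ++ [c.2.1])) := by
          unfold pvStepE; simp [hij, hget]
        rw [hA, hM, hE, ← hsz,
          ih (e1.1 ++ [c.1], e1.2 ++ [(m.size : Int)])
             (e2.1 ++ [(m.size : Int)], e2.2 ++ [c.2.1]) (m.insert c.2.2 (m.size : Int))]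

-- enumerate of a snoc
lemma pvEnum_append (xs : List Int) (y : Int) (s : Int) :
    PySem.List.enumerate (xs ++ [y]) s
      = PySem.List.enumerate xs s ++ [(s + xs.length, y)] := by
  induction xs generalizing s with
  | nil => simp [PySem.List.enumerate_cons, PySem.List.enumerate_nil]
  | cons x xs ih =>
    simp only [List.cons_append, PySem.List.enumerate_cons, ih (s + 1), List.length_cons]
    push_cast
    ring_nf

lemma pvMkIdx_append (ks : List Int) (d : Int) :
    pvMkIdx (ks ++ [d]) = (pvMkIdx ks).insert d (ks.length : Int) := by
  unfold pvMkIdx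
  rw [pvEnum_append, List.foldl_append]
  simp

lemma pvMkIdx_contains (ks : List Int) (d : Int) :
    (pvMkIdx ks).contains d = decide (d ∈ ks) := by
  induction ks using List.reverseRecOn with
  | nil => simp [pvMkIdx, PySem.List.enumerate_nil, PySem.Dict.contains_empty]
  | append_singleton ks k ih =>
    rw [pvMkIdx_append, PySem.Dict.contains_insert, ih]
    by_cases h : d = k <;> simp [h]

lemma pvMkIdx_size (ks : List Int) (hnd : ks.Nodup) : (pvMkIdx ks).size = ks.length := by
  induction ks using List.reverseRecOn with
  | nil => simp [pvMkIdx, PySem.List.enumerate_nil]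
  | append_singleton ks k ih =>
    have hnd' := List.Nodup.of_append_left hnd
    have hk : k ∉ ks := by
      simp [List.nodup_append] at hnd
      exact fun h => hnd.2 k h rfl
    rw [pvMkIdx_append, PySem.Dict.size_insert, pvMkIdx_contains]
    simp [hk, ih hnd']

-- B's enumerate-indexed dict of a dedup list IS A's incrementally built table.
lemma pvM_eq (ds : List Int) (ks : List Int) (hnd : ks.Nodup) :
    ds.foldl (fun m d => if m.contains d = false then m.insert d (m.size : Int) else m)
        (pvMkIdx ks)
      = pvMkIdx (ds.foldl PySem.Set.add ks) := by
  induction ds generalizing ks with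
  | nil => rfl
  | cons d ds ih =>
    simp only [List.foldl_cons]
    by_cases h : d ∈ ks
    · have : PySem.Set.add ks d = ks := by simp [PySem.Set.add, PySem.Set.contains, h]
      rw [this, pvMkIdx_contains]
      simp only [h, decide_true]
      exact ih ks hnd
    · have hadd : PySem.Set.add ks d = ks ++ [d] := by
        simp [PySem.Set.add, PySem.Set.contains, h]
      rw [hadd, pvMkIdx_contains]
      simp only [h, decide_false]
      simp only [if_true]
      rw [pvMkIdx_size ks hnd, ← pvMkIdx_append]
      have hnd2 : (ks ++ [d]).Nodup := by
        simp [List.nodup_append, hnd]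
        intro a ha he
        exact h (he ▸ ha)
      exact ih (ks ++ [d]) hnd2
-- the edge fold over the filtered cells is four independent maps
lemma pvE_maps (mf : PySem.Dict Int Int) (FL : List (Int × Int × Int))
    (hFL : ∀ c ∈ FL, c.1 ≠ c.2.1) (e1 e2 : List Int × List Int) :
    FL.foldl (pvStepE mf) (e1, e2) =
      ((e1.1 ++ FL.map (fun c => c.1), e1.2 ++ FL.map (fun c => mf.getD c.2.2 0)),
       (e2.1 ++ FL.map (fun c => mf.getD c.2.2 0), e2.2 ++ FL.map (fun c => c.2.1))) := by
  induction FL generalizing e1 e2 with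
  | nil => simp
  | cons c FL ih =>
    have hc : c.1 ≠ c.2.1 := hFL c (by simp)
    simp only [List.foldl_cons, List.map_cons]
    have hE : pvStepE mf (e1, e2) c =
        ((e1.1 ++ [c.1], e1.2 ++ [mf.getD c.2.2 0]),
         (e2.1 ++ [mf.getD c.2.2 0], e2.2 ++ [c.2.1])) := by
      unfold pvStepE; simp [hc]
    rw [hE, ih (fun c hc => hFL c (by simp [hc]))]
    simp

-- the guarded folds over all cells are the unguarded folds over the off-diagonal cells
lemma pvFoldM_filter (L : List (Int × Int × Int)) (m : PySem.Dict Int Int) :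
    L.foldl pvStepM m =
      ((L.filter (fun c => c.1 != c.2.1)).map (fun c => c.2.2)).foldl
        (fun m d => if m.contains d = false then m.insert d (m.size : Int) else m) m := by
  rw [List.foldl_map, List.foldl_filter]
  apply List.foldl_ext
  intro m' c _
  unfold pvStepM
  by_cases hij : c.1 = c.2.1 <;> by_cases hc : m'.contains c.2.2 = false <;>
    simp [hij, hc]

lemma pvFoldE_filter (mf : PySem.Dict Int Int) (L : List (Int × Int × Int))
    (e : (List Int × List Int) × (List Int × List Int)) :
    L.foldl (pvStepE mf) e = (L.filter (fun c => c.1 != c.2.1)).foldl (pvStepE mf) e := by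
  rw [List.foldl_filter]
  apply List.foldl_ext
  intro e' c _
  unfold pvStepE
  by_cases hij : c.1 = c.2.1 <;> simp [hij]

-- B's cell list is the filtered cell list
lemma pvB_cells_eq (df : List (List Int)) :
    (PySem.List.enumerate df).flatMap (fun ir =>
      ((PySem.List.enumerate ir.2).filter (fun jd => ir.1 != jd.1)).map
        (fun jd => (ir.1, jd.1, jd.2)))
      = (pvCells df).filter (fun c => c.1 != c.2.1) := by
  unfold pvCells
  rw [List.filter_flatMap]
  apply List.flatMap_congr
  intro ir _
  rw [List.filter_map]
  rfl

-- ===== VERDICT (by name: the statement is the Claim_ definition above) =====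
theorem extract_position_edges_spec : Claim_equal_extract_position_edges := by
  intro df _
  unfold Spec_extract_position_edges extract_position_edges_alt
  rw [pvA_cells, pvB_cells_eq]
  have h0 : ((PySem.Dict.empty : PySem.Dict Int Int).size : Int) = 0 := by
    simp [PySem.Dict.size_empty]
  rw [← h0, pvMain (pvCells df) (([], [])) (([], [])) PySem.Dict.empty]
  set FL := (pvCells df).filter (fun c => c.1 != c.2.1) with hFLdef
  have hdedup : PySem.List.dedup (FL.map (fun c => c.2.2))
      = (FL.map (fun c => c.2.2)).foldl PySem.Set.add [] := by
    simp [PySem.Set.ofList_eq_foldl]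
  have hM : (pvCells df).foldl pvStepM PySem.Dict.empty
      = pvMkIdx (PySem.List.dedup (FL.map (fun c => c.2.2))) := by
    rw [pvFoldM_filter, hdedup, ← hFLdef]
    have : (pvMkIdx [] : PySem.Dict Int Int) = PySem.Dict.empty := rfl
    rw [← this, pvM_eq _ [] List.nodup_nil]
  have hFLmem : ∀ c ∈ FL, c.1 ≠ c.2.1 := by
    intro c hc
    have := List.of_mem_filter hc
    simpa using this
  rw [pvFoldE_filter, ← hFLdef, hM,
    pvE_maps _ FL hFLmem (([], [])) (([], []))]
  simp [pvMkIdx]
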